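-- pv_equiv track=rewrite | github.com/pypi-data/pypi-mirror-369 | packages/ultra-tokenizer/ultra_tokenizer-0.1.1.tar.gz/ultra_tokenizer-0.1.1/tokenizer/vocab.py | _get_char_vocab
-- ===== SOURCE A (Python) =====
-- from typing import Dict, List, Set, Optional, Tuple, Union
--
-- def _get_char_vocab(word_counts: Dict[str, int]) -> Dict[str, int]:
--     """Initialize vocabulary with characters from word counts."""
--     vocab = {}
--     for word, count in word_counts.items():
--         for char in word:
--             if char not in vocab:
--                 vocab[char] = 0
--             vocab[char] += count
--     return vocab
-- ===== SOURCE B (Python) =====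
-- def _get_char_vocab(word_counts):
--     """Initialize vocabulary with characters from word counts."""
--     # stage 1: the distinct characters, in first-occurrence order
--     order = list(dict.fromkeys(c for w in word_counts for c in w))
--     # stage 2: one aggregation scan per character
--     return {
--         ch: sum(n for w, n in word_counts.items() for c in w if c == ch)
--         for ch in order
--     }
-- ===== Notes on version B (the rewrite author's own statement) =====
-- stated objective: alternative
-- what changed: B replaces A's single streaming pass with a running dictionary accumulator by a two-stage per-key aggregation: it first collects the distinct characters in first-occurrence order, then computes each character's weighted total by its own scan over all (word, count) pairs, with no mutated accumulator dict.
import Mathlib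
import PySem

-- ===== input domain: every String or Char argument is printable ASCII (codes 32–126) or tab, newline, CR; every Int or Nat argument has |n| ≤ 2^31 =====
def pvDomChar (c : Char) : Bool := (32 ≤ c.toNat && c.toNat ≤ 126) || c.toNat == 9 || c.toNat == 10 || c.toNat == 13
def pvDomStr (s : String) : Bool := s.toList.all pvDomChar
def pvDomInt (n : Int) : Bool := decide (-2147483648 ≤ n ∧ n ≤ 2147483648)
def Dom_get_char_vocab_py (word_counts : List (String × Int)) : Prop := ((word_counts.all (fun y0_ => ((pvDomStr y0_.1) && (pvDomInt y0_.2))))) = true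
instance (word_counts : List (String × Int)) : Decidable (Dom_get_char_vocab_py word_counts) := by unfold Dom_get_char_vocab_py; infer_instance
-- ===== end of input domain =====

-- B replaces A's single streaming pass (running dict accumulator) by a two-stage per-key
-- aggregation: distinct characters first, then one scan over all pairs per character
-- (alternative decomposition; not faster).


-- ===== PORT A =====
-- 'for char in word' yields length-1 strings: modelled by mapping each Char to String.ofList [c].
def get_char_vocab_py (word_counts : List (String × Int)) : List (String × Int) :=
  (word_counts.foldl (fun vocab wc =>
      (wc.1.toList.map (fun c => String.ofList [c])).foldl (fun vocab ch =>
        let vocab := if !(vocab.contains ch) then vocab.insert ch 0 else vocab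
        vocab.insert ch (vocab.getD ch 0 + wc.2)) vocab)
    PySem.Dict.empty).items

-- ===== PORT B =====
-- stage 1: list(dict.fromkeys(...)) = PySem.List.dedup of the concatenated char stream;
-- stage 2: the dict comprehension builds a Dict by inserting each key with its own summed scan.
def get_char_vocab_py_alt (word_counts : List (String × Int)) : List (String × Int) :=
  let order := PySem.List.dedup
    (word_counts.flatMap (fun wc => wc.1.toList.map (fun c => String.ofList [c])))
  (order.foldl (fun d ch =>
      d.insert ch
        (word_counts.foldl (fun acc wc =>
          (wc.1.toList.map (fun c => String.ofList [c])).foldl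
            (fun a c => if c == ch then a + wc.2 else a) acc) 0))
    PySem.Dict.empty).items

-- ===== PRECONDITION & SPEC =====
def Spec_get_char_vocab_py (word_counts : List (String × Int)) (out : List (String × Int)) : Prop := out = get_char_vocab_py_alt word_counts
instance (word_counts : List (String × Int)) (out : List (String × Int)) : Decidable (Spec_get_char_vocab_py word_counts out) := by unfold Spec_get_char_vocab_py; infer_instance

-- ===== CLAIM (what is proved, stated in full; the proofs are below) =====
def Claim_equal_get_char_vocab_py : Prop := ∀ (word_counts : List (String × Int)), Dom_get_char_vocab_py word_counts → Spec_get_char_vocab_py word_counts (get_char_vocab_py word_counts)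

-- ===== LEMMAS AND PROOFS =====

-- A's per-character step (setdefault-style) is a plain upsert.
theorem stepA_eq (d : PySem.Dict String Int) (ch : String) (cnt : Int) :
    ((if !(d.contains ch) then d.insert ch 0 else d).insert ch
      ((if !(d.contains ch) then d.insert ch 0 else d).getD ch 0 + cnt))
    = d.insert ch (d.getD ch 0 + cnt) := by
  cases h : d.contains ch
  · simp [PySem.Dict.getD_insert_self, PySem.Dict.insert_insert_self,
      PySem.Dict.getD_of_not_contains d (0 : Int) h]
  · simp

-- value of A's inner (per-occurrence) fold
theorem getD_foldl_upsert (l : List String) (d : PySem.Dict String Int) (cnt : Int) (c : String) :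
    (l.foldl (fun d x => d.insert x (d.getD x 0 + cnt)) d).getD c 0
      = d.getD c 0 + (l.count c : Int) * cnt := by
  induction l generalizing d with
  | nil => simp
  | cons x l ih =>
    simp only [List.foldl_cons, ih, PySem.Dict.getD_insert, List.count_cons]
    by_cases hx : c = x
    · simp [hx]; ring
    · simp [hx, Ne.symm hx]

-- value after A's whole outer fold: the same per-word summation B's stage 2 computes
theorem getD_outerA (ws : List (String × Int)) (d : PySem.Dict String Int) (c : String) :
    (ws.foldl (fun vocab wc =>
        (wc.1.toList.map (fun x => String.ofList [x])).foldl
          (fun d x => d.insert x (d.getD x 0 + wc.2)) vocab) d).getD c 0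
      = ws.foldl (fun acc wc =>
          acc + ((wc.1.toList.map (fun x => String.ofList [x])).count c : Int) * wc.2)
          (d.getD c 0) := by
  induction ws generalizing d with
  | nil => simp
  | cons wc ws ih => simp only [List.foldl_cons, ih, getD_foldl_upsert]

-- B's inner conditional-sum fold counts occurrences times the weight
theorem foldl_if_eq_add (l : List String) (ch : String) (cnt acc : Int) :
    l.foldl (fun a c => if c == ch then a + cnt else a) acc
      = acc + (l.count ch : Int) * cnt := by
  induction l generalizing acc with
  | nil => simp
  | cons x l ih =>
    simp only [List.foldl_cons, List.count_cons, ih]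
    by_cases hx : x = ch
    · simp [hx]; ring
    · simp [hx]

-- value of B's key-wise insert fold over a nodup key list
theorem getD_foldl_insert_fun (S : List String) (hS : S.Nodup) (f : String → Int)
    (d : PySem.Dict String Int) (c : String) :
    (S.foldl (fun v x => v.insert x (f x)) d).getD c 0
      = if c ∈ S then f c else d.getD c 0 := by
  induction S generalizing d with
  | nil => simp
  | cons x S ih =>
    rcases List.nodup_cons.mp hS with ⟨hx, hS'⟩
    simp only [List.foldl_cons, ih hS', List.mem_cons]
    by_cases hc : c = x
    · subst hc; simp [hx, PySem.Dict.getD_insert_self]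
    · simp [PySem.Dict.getD_insert, fun h : c = x => hc h]

-- keys of A's whole outer fold: all characters, deduplicated in first-occurrence order
theorem keys_outerA (ws : List (String × Int)) (d : PySem.Dict String Int) :
    (ws.foldl (fun vocab wc =>
        (wc.1.toList.map (fun x => String.ofList [x])).foldl
          (fun d x => d.insert x (d.getD x 0 + wc.2)) vocab) d).keys
      = PySem.Set.update d.keys
          (ws.flatMap (fun wc => wc.1.toList.map (fun x => String.ofList [x]))) := by
  induction ws generalizing d with
  | nil => simp [PySem.Set.update]
  | cons wc ws ih =>
    simp only [List.foldl_cons, ih, PySem.Dict.keys_foldl_insert, List.flatMap_cons,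
      PySem.Set.update, List.foldl_append]

-- ===== VERDICT (by name: the statement is the Claim_ definition above) =====
theorem get_char_vocab_py_spec : Claim_equal_get_char_vocab_py := by
  intro word_counts _
  unfold Spec_get_char_vocab_py get_char_vocab_py get_char_vocab_py_alt
  -- normalise A's inner step to a plain upsert
  have hA : (word_counts.foldl (fun vocab wc =>
      (wc.1.toList.map (fun c => String.ofList [c])).foldl (fun vocab ch =>
        let vocab := if !(vocab.contains ch) then vocab.insert ch 0 else vocab
        vocab.insert ch (vocab.getD ch 0 + wc.2)) vocab) PySem.Dict.empty)
      = (word_counts.foldl (fun vocab wc =>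
      (wc.1.toList.map (fun c => String.ofList [c])).foldl
        (fun d x => d.insert x (d.getD x 0 + wc.2)) vocab) PySem.Dict.empty) := by
    apply PySem.List.foldl_congr_mem
    intro acc wc _
    apply PySem.List.foldl_congr_mem
    intro acc' x _
    exact stepA_eq acc' x wc.2
  rw [hA]
  have hnodup : (PySem.List.dedup
      (word_counts.flatMap (fun wc => wc.1.toList.map (fun c => String.ofList [c])))).Nodup := by
    simp only [PySem.List.dedup_eq_ofList]
    exact PySem.Set.nodup_ofList _
  have hkeysA : (word_counts.foldl (fun vocab wc =>
      (wc.1.toList.map (fun c => String.ofList [c])).foldl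
        (fun d x => d.insert x (d.getD x 0 + wc.2)) vocab) PySem.Dict.empty).keys
      = PySem.List.dedup
      (word_counts.flatMap (fun wc => wc.1.toList.map (fun c => String.ofList [c]))) := by
    rw [keys_outerA]
    simp [PySem.Dict.keys_empty, PySem.Set.update, PySem.List.dedup_eq_ofList,
      PySem.Set.ofList]
  have hkeysB : ((PySem.List.dedup
      (word_counts.flatMap (fun wc => wc.1.toList.map (fun c => String.ofList [c])))).foldl
        (fun d ch => d.insert ch
          (word_counts.foldl (fun acc wc =>
            (wc.1.toList.map (fun c => String.ofList [c])).foldl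
              (fun a c => if c == ch then a + wc.2 else a) acc) 0))
        PySem.Dict.empty).keys
      = PySem.List.dedup
      (word_counts.flatMap (fun wc => wc.1.toList.map (fun c => String.ofList [c]))) := by
    rw [PySem.Dict.keys_foldl_insert]
    simp only [PySem.Dict.keys_empty, PySem.Set.update, PySem.List.dedup_eq_ofList]
    have := PySem.Set.ofList_ofList
      (word_counts.flatMap (fun wc => wc.1.toList.map (fun c => String.ofList [c])))
    simpa [PySem.Set.ofList] using this
  rw [PySem.Dict.items_eq_map_keys _ (by rw [hkeysA]; exact hnodup) (0 : Int),
      PySem.Dict.items_eq_map_keys _ (by rw [hkeysB]; exact hnodup) (0 : Int),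
      hkeysA, hkeysB]
  apply List.map_congr_left
  intro k hk
  rw [getD_outerA, getD_foldl_insert_fun _ hnodup, if_pos hk]
  simp only [PySem.Dict.getD_empty]
  refine congrArg (Prod.mk k) ?_
  refine PySem.List.foldl_congr_mem _ _ _ _ ?_
  intro acc wc _
  rw [foldl_if_eq_add]
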